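-- pv_equiv track=rewrite | github.com/sligara7/dnd_creator | services/character/src/character_service/utils/version_diff.py | _assess_level_impact
-- ===== SOURCE A (Python) =====
-- from typing import Dict, List, Optional, Any, Tuple
-- from enum import Enum
--
-- class DiffImpact(str, Enum):
--     """Impact level of a diff."""
--
--     NONE = "none"  # No mechanical impact
--     LOW = "low"  # Minor mechanical impact
--     MEDIUM = "medium"  # Moderate mechanical impact
--     HIGH = "high"  # Major mechanical impact
--     CRITICAL = "critical"  # Game-changing impact
--
-- def _assess_level_impact(changes: List[Dict[str, Any]]) -> DiffImpact:
--     """Assess impact of level changes.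
--
--     Args:
--         changes: List of level changes
--
--     Returns:
--         Impact level
--     """
--     max_change = 0
--     for change in changes:
--         old_val = change.get("old_value", 0)
--         new_val = change.get("new_value", 0)
--         max_change = max(max_change, abs(new_val - old_val))
--
--     if max_change == 0:
--         return DiffImpact.NONE
--     elif max_change == 1:
--         return DiffImpact.MEDIUM
--     elif max_change <= 3:
--         return DiffImpact.HIGH
--     else:
--         return DiffImpact.CRITICAL
-- ===== SOURCE B (Python) =====
-- from enum import Enum
--
--
-- class DiffImpact(str, Enum):
--     NONE = "none"
--     LOW = "low"
--     MEDIUM = "medium"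
--     HIGH = "high"
--     CRITICAL = "critical"
--
--
-- _SEVERITY = {DiffImpact.NONE: 0, DiffImpact.MEDIUM: 1, DiffImpact.HIGH: 2, DiffImpact.CRITICAL: 3}
--
--
-- def _impact_of(change):
--     delta = abs(change.get("new_value", 0) - change.get("old_value", 0))
--     if delta == 0:
--         return DiffImpact.NONE
--     if delta == 1:
--         return DiffImpact.MEDIUM
--     if delta <= 3:
--         return DiffImpact.HIGH
--     return DiffImpact.CRITICAL
--
--
-- def _assess_level_impact(changes):
--     best = DiffImpact.NONE
--     for change in changes:
--         impact = _impact_of(change)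
--         if _SEVERITY[impact] > _SEVERITY[best]:
--             best = impact
--     return best
-- ===== Notes on version B (the rewrite author's own statement) =====
-- stated objective: alternative
-- what changed: B classifies each change into its own DiffImpact and folds with the maximum over an explicit severity order, instead of first reducing all changes to one numeric max delta and categorizing once at the end.
import Mathlib
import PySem

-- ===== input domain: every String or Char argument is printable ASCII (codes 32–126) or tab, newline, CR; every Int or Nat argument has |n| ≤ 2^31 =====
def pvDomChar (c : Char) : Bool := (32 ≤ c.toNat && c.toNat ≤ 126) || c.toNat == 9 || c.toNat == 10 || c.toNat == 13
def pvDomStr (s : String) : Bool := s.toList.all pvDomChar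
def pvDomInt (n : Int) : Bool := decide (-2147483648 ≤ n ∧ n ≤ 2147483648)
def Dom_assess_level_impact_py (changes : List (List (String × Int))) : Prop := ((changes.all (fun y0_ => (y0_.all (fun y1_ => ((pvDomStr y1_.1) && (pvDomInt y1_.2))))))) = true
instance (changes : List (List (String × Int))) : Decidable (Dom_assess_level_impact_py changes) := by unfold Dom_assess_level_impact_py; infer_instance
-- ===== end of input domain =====

-- B classifies each change individually and folds with the maximum over an explicit
-- severity order, instead of reducing to one numeric max delta and categorizing once (alternative decomposition).


-- ===== PORT A =====
def assess_level_impact_py (changes : List (List (String × Int))) : String :=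
  let max_change : Int := changes.foldl (fun max_change change =>
    let old_val := PySem.Dict.getD (PySem.Dict.mk change) "old_value" 0
    let new_val := PySem.Dict.getD (PySem.Dict.mk change) "new_value" 0
    max max_change |new_val - old_val|) 0
  if max_change = 0 then "none"
  else if max_change = 1 then "medium"
  else if max_change ≤ 3 then "high"
  else "critical"

-- ===== PORT B =====
-- Source B's _SEVERITY lookup table
def pvSeverity (s : String) : Int :=
  PySem.Dict.getD (PySem.Dict.mk [("none", 0), ("medium", 1), ("high", 2), ("critical", 3)]) s 0

-- Source B's _impact_of
def pvImpactOf (change : List (String × Int)) : String :=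
  let delta := |PySem.Dict.getD (PySem.Dict.mk change) "new_value" 0 - PySem.Dict.getD (PySem.Dict.mk change) "old_value" 0|
  if delta = 0 then "none"
  else if delta = 1 then "medium"
  else if delta ≤ 3 then "high"
  else "critical"

def assess_level_impact_py_alt (changes : List (List (String × Int))) : String :=
  changes.foldl (fun best change =>
    let impact := pvImpactOf change
    if pvSeverity impact > pvSeverity best then impact else best) "none"

-- ===== PRECONDITION & SPEC =====
def Spec_assess_level_impact_py (changes : List (List (String × Int))) (out : String) : Prop := out = assess_level_impact_py_alt changes
instance (changes : List (List (String × Int))) (out : String) : Decidable (Spec_assess_level_impact_py changes out) := by unfold Spec_assess_level_impact_py; infer_instance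

-- ===== CLAIM (what is proved, stated in full; the proofs are below) =====
def Claim_equal_assess_level_impact_py : Prop := ∀ (changes : List (List (String × Int))), Dom_assess_level_impact_py changes → Spec_assess_level_impact_py changes (assess_level_impact_py changes)

-- ===== LEMMAS AND PROOFS =====

-- A's trailing classification chain, as a function (for the invariant proof)
def pvClsA (m : Int) : String :=
  if m = 0 then "none" else if m = 1 then "medium" else if m ≤ 3 then "high" else "critical"

-- numeric severity of the classification of a delta
def pvRank (x : Int) : Int :=
  if x = 0 then 0 else if x = 1 then 1 else if x ≤ 3 then 2 else 3

lemma pvSevCls (x : Int) : pvSeverity (pvClsA x) = pvRank x := by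
  unfold pvSeverity pvClsA pvRank; split_ifs <;> rfl

lemma pvRank_mono {x y : Int} (hx : 0 ≤ x) (h : x ≤ y) : pvRank x ≤ pvRank y := by
  unfold pvRank; split_ifs <;> omega

lemma pvClsA_eq_of_rank_eq {x y : Int} (h : pvRank x = pvRank y) :
    pvClsA x = pvClsA y := by
  unfold pvRank at h; unfold pvClsA
  split_ifs at h ⊢ <;> first | rfl | omega

-- the per-step agreement: classifying the running max = taking the severity-max of classifications
lemma pvStep (m d : Int) (hm : 0 ≤ m) (hd : 0 ≤ d) :
    pvClsA (max m d) =
      (if pvSeverity (pvClsA d) > pvSeverity (pvClsA m) then pvClsA d else pvClsA m) := by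
  rw [pvSevCls, pvSevCls]
  by_cases h : pvRank m < pvRank d
  · have hmd : m < d := by
      by_contra hc; exact absurd (pvRank_mono hd (not_lt.mp hc)) (not_le.mpr h)
    rw [if_pos h, max_eq_right hmd.le]
  · rw [if_neg h]
    rcases le_or_gt d m with hle | hlt
    · rw [max_eq_left hle]
    · rw [max_eq_right hlt.le]
      exact pvClsA_eq_of_rank_eq (le_antisymm (not_lt.mp h) (pvRank_mono hm hlt.le))

lemma pvLoop (changes : List (List (String × Int))) (m : Int) (best : String)
    (hm : 0 ≤ m) (hb : best = pvClsA m) :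
    pvClsA (changes.foldl (fun max_change change =>
        let old_val := PySem.Dict.getD (PySem.Dict.mk change) "old_value" 0
        let new_val := PySem.Dict.getD (PySem.Dict.mk change) "new_value" 0
        max max_change |new_val - old_val|) m)
      = changes.foldl (fun best change =>
        let impact := pvImpactOf change
        if pvSeverity impact > pvSeverity best then impact else best) best := by
  induction changes generalizing m best with
  | nil => simpa using hb.symm
  | cons c cs ih =>
      simp only [List.foldl_cons]
      apply ih
      · exact le_max_of_le_left hm
      · rw [hb, pvImpactOf]
        exact (pvStep m _ hm (abs_nonneg _)).symm

-- ===== VERDICT (by name: the statement is the Claim_ definition above) =====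
theorem assess_level_impact_py_spec : Claim_equal_assess_level_impact_py := by
  intro changes _
  unfold Spec_assess_level_impact_py assess_level_impact_py assess_level_impact_py_alt
  simpa using pvLoop changes 0 "none" le_rfl rfl
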